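-- pv_equiv track=rewrite | github.com/songyingit/Bits_to_Binders | sequence_cut/cut_sequence.py | find_all_subsequences
-- ===== SOURCE A (Python) =====
-- def find_all_subsequences(seq, length, required_positions):
--     """
--     Find all subsequences of the given length from the input sequence that must include required positions.
--
--     :param seq: The original sequence (string).
--     :param length: Length of the subsequence (int).
--     :param required_positions: List of required positions to be included in the subsequence (0-based).
--     :return: A list of all subsequences of the given length that include the required positions.
--     """
--     seq_length = len(seq)
--
--     # Validate input
--     if length > seq_length:
--         raise ValueError("Requested length is longer than the sequence.")
--
--     if max(required_positions) >= seq_length: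
--         raise ValueError("Required positions are outside the sequence length.")
--
--     # Find valid start positions
--     min_start = min(required_positions) - (length - 1)  # Ensure the first required position fits
--     max_start = max(required_positions)  # Ensure the last required position fits
--
--     # Adjust start range to be within valid bounds
--     valid_start_positions = range(max(0, min_start), min(seq_length - length + 1, max_start + 1))
--
--     # Collect all valid subsequences
--     subsequences = []
--     for start_position in valid_start_positions:
--         subsequence = seq[start_position:start_position + length]
--
--         # Check if all required positions are within the subsequence
--         if all(start_position <= pos < start_position + length for pos in required_positions):
--             subsequences.append(subsequence)
--
--     return subsequences
-- ===== SOURCE B (Python) =====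
-- def find_all_subsequences(seq, length, required_positions):
--     """Same result as A, but the valid start range is computed in closed form:
--     no inner all() scan over required_positions per window."""
--     seq_length = len(seq)
--
--     if length > seq_length:
--         raise ValueError("Requested length is longer than the sequence.")
--
--     if max(required_positions) >= seq_length:
--         raise ValueError("Required positions are outside the sequence length.")
--
--     lo = max(0, max(required_positions) - length + 1)
--     hi = min(seq_length - length + 1, min(required_positions) + 1)
--     return [seq[start:start + length] for start in range(lo, hi)]
-- ===== Notes on version B (the rewrite author's own statement) =====
-- stated objective: simpler
-- what changed: B derives the exact valid start interval in closed form (lo = max(0, max(rp)-length+1), hi = min(n-length+1, min(rp)+1)) and slices once per start, instead of A's scan over a wider range with a per-start all() membership check over required_positions.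
import Mathlib
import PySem

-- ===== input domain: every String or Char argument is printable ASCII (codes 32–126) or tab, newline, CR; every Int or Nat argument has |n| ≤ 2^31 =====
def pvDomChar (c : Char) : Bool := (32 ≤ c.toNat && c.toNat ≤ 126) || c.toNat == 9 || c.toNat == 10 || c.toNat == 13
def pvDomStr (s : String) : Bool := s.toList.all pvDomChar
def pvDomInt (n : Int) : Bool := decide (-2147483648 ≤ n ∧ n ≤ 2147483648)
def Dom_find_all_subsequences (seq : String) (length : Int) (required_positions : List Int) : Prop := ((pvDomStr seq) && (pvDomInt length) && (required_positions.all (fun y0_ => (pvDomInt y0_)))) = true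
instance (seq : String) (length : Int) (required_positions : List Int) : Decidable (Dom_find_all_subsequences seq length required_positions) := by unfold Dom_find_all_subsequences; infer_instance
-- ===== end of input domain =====

-- B computes the valid start interval in closed form instead of A's scan-and-filter;
-- ValueError inputs (empty required_positions, length > len(seq), max(rp) >= len(seq)) are outside Pre_.

-- ===== PORT A =====
def find_all_subsequences (seq : String) (length : Int) (required_positions : List Int) : List String :=
  let seq_length : Int := PySem.Str.len seq
  if length > seq_length then []            -- Python: raise ValueError (outside Pre_)
  else
    match PySem.List.max? required_positions (fun x => x),
          PySem.List.min? required_positions (fun x => x) with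
    | some mx, some mn =>
      if mx ≥ seq_length then []            -- Python: raise ValueError (outside Pre_)
      else
        let min_start := mn - (length - 1)
        let max_start := mx
        let valid_start_positions :=
          PySem.List.pyRange (max 0 min_start) (min (seq_length - length + 1) (max_start + 1)) 1
        valid_start_positions.foldl
          (fun subsequences start_position =>
            let subsequence :=
              PySem.Str.slice seq (some start_position) (some (start_position + length))
            if required_positions.all
                 (fun pos => decide (start_position ≤ pos ∧ pos < start_position + length)) then
              subsequences ++ [subsequence]
            else subsequences) []
    | _, _ => []                            -- Python: max([]) raises ValueError (outside Pre_)

-- ===== PORT B =====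
def find_all_subsequences_alt (seq : String) (length : Int) (required_positions : List Int) : List String :=
  let seq_length : Int := PySem.Str.len seq
  if length > seq_length then []            -- Python: raise ValueError (outside Pre_)
  else
    match PySem.List.max? required_positions (fun x => x) with
    | none => []                            -- Python: max([]) raises ValueError (outside Pre_)
    | some mx =>
      match PySem.List.min? required_positions (fun x => x) with
      | none => []
      | some mn =>
        if mx ≥ seq_length then []          -- Python: raise ValueError (outside Pre_)
        else
          let lo := max 0 (mx - length + 1)
          let hi := min (seq_length - length + 1) (mn + 1)
          (PySem.List.pyRange lo hi 1).map
            (fun start => PySem.Str.slice seq (some start) (some (start + length)))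

-- ===== PRECONDITION & SPEC =====
-- Pre_ excludes exactly the inputs where A raises ValueError: empty required_positions,
-- length > len(seq), or some required position >= len(seq). B raises identically there.
def Pre_find_all_subsequences (seq : String) (length : Int) (required_positions : List Int) : Prop :=
  required_positions ≠ [] ∧ length ≤ (seq.toList.length : Int) ∧
    ∀ p ∈ required_positions, p < (seq.toList.length : Int)
instance (seq : String) (length : Int) (required_positions : List Int) : Decidable (Pre_find_all_subsequences seq length required_positions) := by unfold Pre_find_all_subsequences; infer_instance

def pvWitness_find_all_subsequences : String × Int × List Int := ("abcdef", 3, [2, 3])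

def Spec_find_all_subsequences (seq : String) (length : Int) (required_positions : List Int) (out : List String) : Prop := out = find_all_subsequences_alt seq length required_positions
instance (seq : String) (length : Int) (required_positions : List Int) (out : List String) : Decidable (Spec_find_all_subsequences seq length required_positions out) := by unfold Spec_find_all_subsequences; infer_instance

-- ===== CLAIM (what is proved, stated in full; the proofs are below) =====
def Claim_equal_find_all_subsequences : Prop := ∀ (seq : String) (length : Int) (required_positions : List Int), Dom_find_all_subsequences seq length required_positions → Pre_find_all_subsequences seq length required_positions → Spec_find_all_subsequences seq length required_positions (find_all_subsequences seq length required_positions)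

-- ===== LEMMAS AND PROOFS =====

-- Filtering an integer range by a closed interval yields the intersected range.
theorem filter_pyRange_interval (c d : Int) : ∀ (a b : Int),
    (PySem.List.pyRange a b 1).filter (fun x => decide (c ≤ x ∧ x < d))
      = PySem.List.pyRange (max a c) (min b d) 1 := by
  intro a b
  by_cases hab : b ≤ a
  · rw [PySem.List.pyRange_one_eq_nil hab, PySem.List.pyRange_one_eq_nil (by omega)]
    rfl
  · have h : ∀ (n : Nat) (a : Int), (b - a).toNat = n →
        (PySem.List.pyRange a b 1).filter (fun x => decide (c ≤ x ∧ x < d))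
          = PySem.List.pyRange (max a c) (min b d) 1 := by
      intro n
      induction n with
      | zero =>
        intro a ha
        rw [PySem.List.pyRange_one_eq_nil (by omega), PySem.List.pyRange_one_eq_nil (by omega)]
        rfl
      | succ k ih =>
        intro a ha
        rw [PySem.List.pyRange_one_cons (by omega : a < b)]
        rw [List.filter_cons]
        by_cases hca : c ≤ a ∧ a < d
        · simp only [hca, decide_true, and_self, if_true]
          rw [ih (a + 1) (by omega)]
          have : max (a + 1) c = a + 1 := by omega
          rw [this]
          have hmax : max a c = a := by omega
          rw [hmax, PySem.List.pyRange_one_cons (by omega : a < min b d)]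
        · have : decide (c ≤ a ∧ a < d) = false := by
            simp only [decide_eq_false_iff_not]; exact hca
          simp only [this]
          rw [ih (a + 1) (by omega)]
          rcases not_and_or.mp hca with h1 | h2
          · have : max (a + 1) c = max a c := by omega
            rw [this]
            simp
          · rw [PySem.List.pyRange_one_eq_nil (by omega : min b d ≤ max (a + 1) c),
                PySem.List.pyRange_one_eq_nil (by omega : min b d ≤ max a c)]
            simp
    exact h (b - a).toNat a rfl

theorem find_all_subsequences_spec_aux (seq : String) (length : Int) (required_positions : List Int)
    (hpre : Pre_find_all_subsequences seq length required_positions) :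
    find_all_subsequences seq length required_positions
      = find_all_subsequences_alt seq length required_positions := by
  obtain ⟨hne, hlen, hbound⟩ := hpre
  cases hmx : PySem.List.max? required_positions (fun x => x) with
  | none => exact absurd ((PySem.List.max?_eq_none_iff _ _).mp hmx) hne
  | some mx =>
    cases hmn : PySem.List.min? required_positions (fun x => x) with
    | none => exact absurd ((PySem.List.min?_eq_none_iff _ _).mp hmn) hne
    | some mn =>
      have hmx_mem := PySem.List.max?_mem hmx
      have hmn_mem := PySem.List.min?_mem hmn
      have hmx_max : ∀ y ∈ required_positions, y ≤ mx := PySem.List.max?_isMax hmx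
      have hmn_min : ∀ y ∈ required_positions, mn ≤ y := PySem.List.min?_isMin hmn
      have hmnmx : mn ≤ mx := hmn_min mx hmx_mem
      have hmx_lt : mx < (seq.toList.length : Int) := hbound mx hmx_mem
      have hL : PySem.Str.len seq = (seq.toList.length : Int) := by
        simp [PySem.Str.len]
      simp only [find_all_subsequences, find_all_subsequences_alt, hmx, hmn]
      rw [if_neg (by omega : ¬ length > PySem.Str.len seq),
          if_neg (by omega : ¬ length > PySem.Str.len seq),
          if_neg (by omega : ¬ mx ≥ PySem.Str.len seq),
          if_neg (by omega : ¬ mx ≥ PySem.Str.len seq)]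
      -- the all() test is equivalent to an interval condition on start
      have hall : ∀ s : Int,
          (required_positions.all (fun pos => decide (s ≤ pos ∧ pos < s + length)))
            = decide (mx - length + 1 ≤ s ∧ s < mn + 1) := by
        intro s
        by_cases h : mx - length + 1 ≤ s ∧ s < mn + 1
        · have h' : required_positions.all (fun pos => decide (s ≤ pos ∧ pos < s + length)) = true := by
            rw [List.all_eq_true]
            intro p hp
            have h1 := hmx_max p hp
            have h2 := hmn_min p hp
            simp only [decide_eq_true_eq]
            omega
          rw [h', (by simpa using h : decide (mx - length + 1 ≤ s ∧ s < mn + 1) = true)]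
        · have h' : required_positions.all (fun pos => decide (s ≤ pos ∧ pos < s + length)) = false := by
            rw [List.all_eq_false]
            rcases not_and_or.mp h with h1 | h2
            · exact ⟨mx, hmx_mem, by simp only [decide_eq_true_eq]; omega⟩
            · exact ⟨mn, hmn_mem, by simp only [decide_eq_true_eq]; omega⟩
          rw [h', (by simpa using h : decide (mx - length + 1 ≤ s ∧ s < mn + 1) = false)]
      have hfun :
          (fun (subsequences : List String) (start_position : Int) =>
            if required_positions.all
                 (fun pos => decide (start_position ≤ pos ∧ pos < start_position + length)) then
              subsequences ++ [PySem.Str.slice seq (some start_position) (some (start_position + length))]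
            else subsequences)
          = (fun (subsequences : List String) (start_position : Int) =>
            if (fun s => decide (mx - length + 1 ≤ s ∧ s < mn + 1)) start_position then
              subsequences ++ [(fun s => PySem.Str.slice seq (some s) (some (s + length))) start_position]
            else subsequences) := by
        funext acc s
        rw [hall]
      rw [hfun,
          PySem.List.foldl_append_if
            (fun s => decide (mx - length + 1 ≤ s ∧ s < mn + 1))
            (fun s => PySem.Str.slice seq (some s) (some (s + length))),
          filter_pyRange_interval, List.nil_append]
      have h1 : max (max 0 (mn - (length - 1))) (mx - length + 1) = max 0 (mx - length + 1) := by
        omega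
      have h2 : min (min (PySem.Str.len seq - length + 1) (mx + 1)) (mn + 1)
          = min (PySem.Str.len seq - length + 1) (mn + 1) := by
        omega
      rw [h1, h2]

-- ===== VERDICT (by name: the statement is the Claim_ definition above) =====
theorem find_all_subsequences_spec : Claim_equal_find_all_subsequences := by
  intro seq length required_positions _ hpre
  exact find_all_subsequences_spec_aux seq length required_positions hpre
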